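-- pv_equiv track=rewrite | github.com/NadimKawwa/loan-help | app.py | purp_to_int
-- ===== SOURCE A (Python) =====
-- def purp_to_int(title):
--
--
--     #force make string if not and make lower
--     title_lower = str(title).lower()
--
--     #list of employment types to consider
--     title_list = ['purp_car', 'purp_credit_card', 'purp_debt_consolidation',
--                   'purp_educational', 'purp_home_improvement',
--                   'purp_house', 'purp_major_purchase', 'purp_medical',
--                   'purp_moving', 'purp_other', 'purp_renewable_energy',
--                   'purp_small_business', 'purp_vacation', 'purp_wedding']
--
--     #instantiate title dict
--     title_dict = dict(zip(title_list,
--                           len(title_list)*[0]))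
--     #check if any shared items
--     for key in title_dict:
--         if bool(set(title_lower.split()) & set(key.split('_'))):
--             title_dict[key] = 1
--
--     return title_dict
-- ===== SOURCE B (Python) =====
-- def purp_to_int(title):
--     title_list = ['purp_car', 'purp_credit_card', 'purp_debt_consolidation',
--                   'purp_educational', 'purp_home_improvement',
--                   'purp_house', 'purp_major_purchase', 'purp_medical',
--                   'purp_moving', 'purp_other', 'purp_renewable_energy',
--                   'purp_small_business', 'purp_vacation', 'purp_wedding']
--
--     # inverted index: subtoken -> keys containing it (built once)
--     index = {}
--     for key in title_list:
--         for tok in key.split('_'):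
--             index.setdefault(tok, []).append(key)
--
--     result = dict.fromkeys(title_list, 0)
--     for word in str(title).lower().split():
--         for key in index.get(word, []):
--             result[key] = 1
--     return result
-- ===== Notes on version B (the rewrite author's own statement) =====
-- stated objective: alternative
-- what changed: B builds an inverted index from each key's underscore-separated subtokens to the keys containing them once, then marks categories by probing that index with each lowercased title word, instead of A's per-key set-intersection test against the word set.
import Mathlib
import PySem

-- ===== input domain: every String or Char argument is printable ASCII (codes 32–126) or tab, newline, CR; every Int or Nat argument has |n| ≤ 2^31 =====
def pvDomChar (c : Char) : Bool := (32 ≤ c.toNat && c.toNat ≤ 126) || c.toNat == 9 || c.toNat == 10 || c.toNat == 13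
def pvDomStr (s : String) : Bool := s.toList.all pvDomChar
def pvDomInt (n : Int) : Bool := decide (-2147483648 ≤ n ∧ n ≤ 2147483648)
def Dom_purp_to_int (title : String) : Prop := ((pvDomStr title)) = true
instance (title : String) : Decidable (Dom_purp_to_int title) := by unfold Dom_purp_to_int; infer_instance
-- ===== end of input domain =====

-- B replaces A's per-key set-intersection scan by an inverted subtoken→keys index probed once per title word (alternative algorithm).


-- the fixed category keys (the Python literal title_list, shared by both ports)
def pvTitleList : List String :=
  ["purp_car", "purp_credit_card", "purp_debt_consolidation",
   "purp_educational", "purp_home_improvement",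
   "purp_house", "purp_major_purchase", "purp_medical",
   "purp_moving", "purp_other", "purp_renewable_energy",
   "purp_small_business", "purp_vacation", "purp_wedding"]

-- key.split('_')  (non-empty separator; exact via PySem.Chars.splitOn)
def pvSplitU (s : String) : List String :=
  (PySem.Chars.splitOn s.toList ['_']).map String.ofList

-- ===== PORT A =====
def purp_to_int (title : String) : List (String × Int) :=
  let titleLower := PySem.Str.lower title
  let titleDict : PySem.Dict String Int :=
    PySem.Dict.ofList (pvTitleList.zip (PySem.List.pyRepeat [(0 : Int)] pvTitleList.length))
  let finalDict := titleDict.keys.foldl (fun d key =>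
      if PySem.Set.inter (PySem.Set.ofList (PySem.Str.split₀ titleLower))
           (PySem.Set.ofList (pvSplitU key)) ≠ [] then
        d.insert key 1
      else d) titleDict
  finalDict.items

-- ===== PORT B =====
def purp_to_int_alt (title : String) : List (String × Int) :=
  let index : PySem.Dict String (List String) :=
    pvTitleList.foldl (fun d key =>
      (pvSplitU key).foldl (fun d tok => d.modify tok [] (· ++ [key])) d)
      PySem.Dict.empty
  let result0 : PySem.Dict String Int := PySem.Dict.ofList (pvTitleList.map (fun k => (k, 0)))
  let finalDict := (PySem.Str.split₀ (PySem.Str.lower title)).foldl (fun d w =>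
      (index.getD w []).foldl (fun d k => d.insert k 1) d) result0
  finalDict.items

-- ===== PRECONDITION & SPEC =====
def Spec_purp_to_int (title : String) (out : List (String × Int)) : Prop := out = purp_to_int_alt title
instance (title : String) (out : List (String × Int)) : Decidable (Spec_purp_to_int title out) := by unfold Spec_purp_to_int; infer_instance

-- ===== CLAIM (what is proved, stated in full; the proofs are below) =====
def Claim_equal_purp_to_int : Prop := ∀ (title : String), Dom_purp_to_int title → Spec_purp_to_int title (purp_to_int title)

-- ===== LEMMAS AND PROOFS =====

-- one key's subtoken loop in B's index build: its effect on any lookup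
theorem pv_inner_getD (toks : List String) (key : String)
    (d : PySem.Dict String (List String)) (w : String) :
    ((toks.foldl (fun d t => d.modify t [] (· ++ [key])) d).getD w []) =
      d.getD w [] ++ List.replicate (toks.count w) key := by
  have h := List.foldl_map (f := fun t : String => (t, key))
      (g := fun (d : PySem.Dict String (List String)) (p : String × String) =>
        d.modify p.1 [] (· ++ [p.2])) (l := toks) (init := d)
  simp only at h
  rw [← h, PySem.Dict.getD_foldl_modify_append]
  congr 1
  rw [List.filter_map, List.map_map]
  simp [Function.comp_def, List.map_const', List.count, List.countP_eq_length_filter]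

-- membership in the index built from any key list
theorem pv_idx_mem (keys : List String) (d : PySem.Dict String (List String)) (w k : String) :
    (k ∈ ((keys.foldl (fun d key =>
        (pvSplitU key).foldl (fun d tok => d.modify tok [] (· ++ [key])) d) d).getD w [])) ↔
      k ∈ d.getD w [] ∨ (k ∈ keys ∧ w ∈ pvSplitU k) := by
  induction keys generalizing d with
  | nil => simp
  | cons key rest ih =>
    rw [List.foldl_cons, ih, pv_inner_getD]
    simp only [List.mem_append, List.mem_replicate, List.mem_cons]
    constructor
    · rintro (⟨h | ⟨hc, rfl⟩⟩ | ⟨hm, hw⟩)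
      · exact Or.inl h
      · exact Or.inr ⟨Or.inl rfl, List.count_pos_iff.mp (Nat.pos_of_ne_zero hc)⟩
      · exact Or.inr ⟨Or.inr hm, hw⟩
    · rintro (h | ⟨rfl | hm, hw⟩)
      · exact Or.inl (Or.inl h)
      · exact Or.inl (Or.inr ⟨(List.count_pos_iff.mpr hw).ne', rfl⟩)
      · exact Or.inr ⟨hm, hw⟩

theorem pv_set_update_of_subset (s : PySem.Set String) (l : List String)
    (h : ∀ x ∈ l, x ∈ s) : PySem.Set.update s l = s := by
  induction l generalizing s with
  | nil => simp [PySem.Set.update]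
  | cons x rest ih =>
    simp only [PySem.Set.update, List.foldl_cons] at *
    rw [PySem.Set.add_of_mem (h x (by simp))]
    exact ih s (fun y hy => h y (by simp [hy]))

theorem pv_ins1_getD (l : List String) (d : PySem.Dict String Int) (k : String) :
    ((l.foldl (fun d k' => d.insert k' 1) d).getD k 0) = if k ∈ l then 1 else d.getD k 0 := by
  induction l generalizing d with
  | nil => simp
  | cons x rest ih =>
    rw [List.foldl_cons, ih, PySem.Dict.getD_insert]
    by_cases hk : k = x <;> simp [hk]

theorem pv_ins1_keys (l : List String) (d : PySem.Dict String Int)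
    (h : ∀ x ∈ l, x ∈ d.keys) :
    (l.foldl (fun d k' => d.insert k' 1) d).keys = d.keys := by
  rw [PySem.Dict.keys_foldl_insert l (fun _ _ => (1 : Int)) d]
  exact pv_set_update_of_subset d.keys l h

-- B's word loop: final value at k, and keys unchanged (idx arbitrary)
theorem pvB_getD (idx : PySem.Dict String (List String)) (ws : List String)
    (d : PySem.Dict String Int) (k : String) :
    ((ws.foldl (fun d w => (idx.getD w []).foldl (fun d k' => d.insert k' 1) d) d).getD k 0) =
      if ∃ w ∈ ws, k ∈ idx.getD w [] then 1 else d.getD k 0 := by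
  induction ws generalizing d with
  | nil => simp
  | cons w rest ih =>
    rw [List.foldl_cons, ih, pv_ins1_getD]
    by_cases hw : k ∈ idx.getD w []
    · simp [hw]
    · simp only [hw, if_false, List.mem_cons]
      by_cases hr : ∃ w' ∈ rest, k ∈ idx.getD w' [] <;> simp [hr, hw]

theorem pvB_keys (idx : PySem.Dict String (List String)) (ws : List String)
    (d : PySem.Dict String Int)
    (hsub : ∀ w k, k ∈ idx.getD w [] → k ∈ d.keys) :
    (ws.foldl (fun d w => (idx.getD w []).foldl (fun d k' => d.insert k' 1) d) d).keys = d.keys := by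
  induction ws generalizing d with
  | nil => rfl
  | cons w rest ih =>
    rw [List.foldl_cons]
    have hk : ((idx.getD w []).foldl (fun d k' => d.insert k' 1) d).keys = d.keys :=
      pv_ins1_keys _ _ (fun x hx => hsub w x hx)
    rw [ih _ (fun w' k' h' => by rw [hk]; exact hsub w' k' h')]
    exact hk

-- A's key loop: final value at k, and keys unchanged
theorem pvA_getD (ws : List String) (l : List String) (d : PySem.Dict String Int) (k : String) :
    ((l.foldl (fun d key =>
        if PySem.Set.inter (PySem.Set.ofList ws) (PySem.Set.ofList (pvSplitU key)) ≠ [] then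
          d.insert key 1 else d) d).getD k 0) =
      if k ∈ l ∧ PySem.Set.inter (PySem.Set.ofList ws) (PySem.Set.ofList (pvSplitU k)) ≠ [] then 1
      else d.getD k 0 := by
  induction l generalizing d with
  | nil => simp
  | cons key rest ih =>
    rw [List.foldl_cons]
    by_cases hc : PySem.Set.inter (PySem.Set.ofList ws) (PySem.Set.ofList (pvSplitU key)) ≠ []
    · rw [if_pos hc, ih, PySem.Dict.getD_insert]
      by_cases hk : k = key
      · subst hk
        by_cases hr : k ∈ rest <;> simp [hr, hc]
      · simp only [List.mem_cons, hk, false_or, if_false]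
    · rw [if_neg hc, ih]
      by_cases hk : k = key
      · subst hk
        by_cases hr : k ∈ rest <;> simp [hr, hc]
      · simp only [List.mem_cons, hk, false_or]

theorem pvA_keys (ws : List String) (l : List String) (d : PySem.Dict String Int)
    (h : ∀ x ∈ l, x ∈ d.keys) :
    (l.foldl (fun d key =>
        if PySem.Set.inter (PySem.Set.ofList ws) (PySem.Set.ofList (pvSplitU key)) ≠ [] then
          d.insert key 1 else d) d).keys = d.keys := by
  induction l generalizing d with
  | nil => rfl
  | cons key rest ih =>
    rw [List.foldl_cons]
    by_cases hc : PySem.Set.inter (PySem.Set.ofList ws) (PySem.Set.ofList (pvSplitU key)) ≠ []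
    · rw [if_pos hc]
      have hk : (d.insert key 1).keys = d.keys := by
        have h1 := PySem.Dict.keys_foldl_insert [key] (fun _ _ => (1 : Int)) d
        simp only [List.foldl_cons, List.foldl_nil] at h1
        rw [h1, PySem.Set.update, List.foldl_cons, List.foldl_nil,
          PySem.Set.add_of_mem (h key (by simp))]
      rw [ih _ (by rw [hk]; exact fun x hx => h x (by simp [hx]))]
      exact hk
    · rw [if_neg hc]
      exact ih _ (fun x hx => h x (by simp [hx]))

-- bool(set(ws) & set(toks)) is "some word is a subtoken"
theorem pv_inter_ne_nil_iff (ws toksl : List String) :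
    (PySem.Set.inter (PySem.Set.ofList ws) (PySem.Set.ofList toksl) ≠ []) ↔
      ∃ w ∈ ws, w ∈ toksl := by
  rw [ne_eq, List.eq_nil_iff_forall_not_mem]
  push Not
  constructor
  · rintro ⟨x, hx⟩
    have hm := (PySem.Set.mem_inter _ _ x).mp hx
    exact ⟨x, (PySem.Set.mem_ofList _ _).mp hm.1, (PySem.Set.mem_ofList _ _).mp hm.2⟩
  · rintro ⟨w, h1, h2⟩
    exact ⟨w, (PySem.Set.mem_inter _ _ w).mpr
      ⟨(PySem.Set.mem_ofList _ _).mpr h1, (PySem.Set.mem_ofList _ _).mpr h2⟩⟩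

-- ===== VERDICT (by name: the statement is the Claim_ definition above) =====
theorem purp_to_int_spec : Claim_equal_purp_to_int := by
  intro title _
  unfold Spec_purp_to_int purp_to_int purp_to_int_alt
  simp only []
  have hK : (PySem.Dict.ofList (pvTitleList.zip
      (PySem.List.pyRepeat [(0 : Int)] pvTitleList.length))).keys = pvTitleList := by decide
  have hd0r : PySem.Dict.ofList (pvTitleList.zip
        (PySem.List.pyRepeat [(0 : Int)] pvTitleList.length)) =
      PySem.Dict.ofList (pvTitleList.map (fun k => (k, (0 : Int)))) := by decide
  rw [hK, hd0r] at *
  set ws := PySem.Str.split₀ (PySem.Str.lower title) with hws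
  set r0 := PySem.Dict.ofList (pvTitleList.map (fun k => (k, (0 : Int)))) with hr0
  have hrK : r0.keys = pvTitleList := by rw [hr0]; decide
  have hidx : ∀ w k, k ∈ ((pvTitleList.foldl (fun d key =>
      (pvSplitU key).foldl (fun d tok => d.modify tok [] (· ++ [key])) d)
      PySem.Dict.empty).getD w []) ↔ (k ∈ pvTitleList ∧ w ∈ pvSplitU k) := by
    intro w k
    rw [pv_idx_mem]
    simp [PySem.Dict.getD_empty]
  have hAkeys := pvA_keys ws pvTitleList r0 (by rw [hrK]; exact fun x hx => hx)
  have hBkeys := pvB_keys _ ws r0 (fun w k h => by rw [hrK]; exact ((hidx w k).mp h).1)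
  rw [PySem.Dict.items_eq_map_keys _ (by rw [hAkeys, hrK]; decide) 0,
      PySem.Dict.items_eq_map_keys _ (by rw [hBkeys, hrK]; decide) 0,
      hAkeys, hBkeys, hrK]
  apply List.map_congr_left
  intro k hk
  rw [pvA_getD, pvB_getD]
  refine congrArg (fun v => (k, v)) (if_congr ?_ rfl rfl)
  simp only [hidx]
  constructor
  · rintro ⟨hkT, hne⟩
    obtain ⟨w, hw, hsub⟩ := (pv_inter_ne_nil_iff ws (pvSplitU k)).mp hne
    exact ⟨w, hw, hkT, hsub⟩
  · rintro ⟨w, hw, hkT, hsub⟩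
    exact ⟨hkT, (pv_inter_ne_nil_iff ws (pvSplitU k)).mpr ⟨w, hw, hsub⟩⟩
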